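-- pv_equiv track=rewrite | github.com/BoyuanJackChen/code_cascading_shared | code/stats_single.py | count_total_ids
-- ===== SOURCE A (Python) =====
-- def count_total_ids(the_dict, p, t=-1):
--     total_ids = 0
--     current_number = -1
--     current_count = 0
--     for answer in the_dict:
--         number = answer["number"]
--         if number != current_number:
--             current_number = number
--             current_count = 0
--         if current_count < p:
--             if t<0:
--                 total_ids += answer["num_ids"]
--             else:
--                 total_ids += answer[f"num_ids_{t}"]
--             current_count += 1
--         else:
--             continue
--     return total_ids
-- ===== SOURCE B (Python) =====
-- def count_total_ids(the_dict, p, t=-1):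
--     key = "num_ids" if t < 0 else f"num_ids_{t}"
--     take = max(p, 0)
--     total = 0
--     i = 0
--     n = len(the_dict)
--     while i < n:
--         num = the_dict[i]["number"]
--         j = i
--         while j < n and the_dict[j]["number"] == num:
--             j += 1
--         total += sum(a[key] for a in the_dict[i:min(i + take, j)])
--         i = j
--     return total
-- ===== Notes on version B (the rewrite author's own statement) =====
-- stated objective: alternative
-- what changed: Replaces A's running current_number/current_count state machine with a group-then-slice-then-sum pipeline: the key name is computed once, the list is split into consecutive runs of equal 'number', and the first max(p,0) entries of each run are summed.
-- outside the precondition, e.g. on count_total_ids([{'number': 1, 'num_ids': 2}, {'number': 1}], 1, -1): A returns 2, B returns 2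
import Mathlib
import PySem

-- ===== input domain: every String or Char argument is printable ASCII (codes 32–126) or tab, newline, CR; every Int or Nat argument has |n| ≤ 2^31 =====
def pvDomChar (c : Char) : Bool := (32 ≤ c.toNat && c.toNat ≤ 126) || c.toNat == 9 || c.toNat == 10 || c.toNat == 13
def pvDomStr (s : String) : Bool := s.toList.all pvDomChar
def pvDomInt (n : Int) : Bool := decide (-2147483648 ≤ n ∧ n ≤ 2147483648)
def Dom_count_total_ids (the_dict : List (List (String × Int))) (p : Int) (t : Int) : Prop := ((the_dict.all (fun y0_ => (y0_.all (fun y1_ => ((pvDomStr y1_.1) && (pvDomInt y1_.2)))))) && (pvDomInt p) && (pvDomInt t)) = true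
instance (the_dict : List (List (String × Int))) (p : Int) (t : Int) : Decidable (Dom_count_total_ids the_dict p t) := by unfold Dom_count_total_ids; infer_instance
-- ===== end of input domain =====

-- B replaces A's running current_number/current_count state machine by a group-runs / slice / sum
-- pipeline over the same consecutive runs (objective: alternative decomposition, same cost).

-- ===== PORT A =====
-- first-match lookup in the association list; Python `answer[k]` raises KeyError when the key is
-- absent — Pre_count_total_ids excludes exactly those inputs, so the `.getD 0` default is never hit
-- on admitted inputs and the lookup is exact there.
def pyLookup (d : List (String × Int)) (k : String) : Int :=
  ((d.find? (fun kv => kv.1 == k)).map (·.2)).getD 0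

-- one iteration of A's for-loop; state = (total_ids, current_number, current_count)
def ctiStepA (p t : Int) (st : Int × Int × Int) (answer : List (String × Int)) : Int × Int × Int :=
  let number := pyLookup answer "number"
  let st1 := if number ≠ st.2.1 then (st.1, number, (0 : Int)) else st
  if st1.2.2 < p then
    (st1.1 + (if t < 0 then pyLookup answer "num_ids"
              else pyLookup answer ("num_ids_" ++ PySem.Int.toStr t)),
     st1.2.1, st1.2.2 + 1)
  else st1

def count_total_ids (the_dict : List (List (String × Int))) (p : Int) (t : Int) : Int :=
  (the_dict.foldl (ctiStepA p t) (0, -1, 0)).1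

-- ===== PORT B =====
def ctiNum (a : List (String × Int)) : Int := pyLookup a "number"

-- B's outer while-loop: split the list into maximal consecutive runs of equal "number"
-- (the inner `while j < n and ...` scan is the takeWhile/dropWhile of the remainder)
def ctiRuns : List (List (String × Int)) → List (List (List (String × Int)))
  | [] => []
  | x :: xs =>
    (x :: xs.takeWhile (fun y => ctiNum y == ctiNum x)) ::
      ctiRuns (xs.dropWhile (fun y => ctiNum y == ctiNum x))
  termination_by l => l.length
  decreasing_by
    simp only [List.length_cons]
    have := List.length_dropWhile_le (fun y => ctiNum y == ctiNum x) xs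
    omega

-- key computed once; per run sum the first max(p,0) entries' values (Int.toNat = max(p,0))
def count_total_ids_alt (the_dict : List (List (String × Int))) (p : Int) (t : Int) : Int :=
  let key := if t < 0 then "num_ids" else "num_ids_" ++ PySem.Int.toStr t
  ((ctiRuns the_dict).map
    (fun g => ((g.take p.toNat).map (fun a => pyLookup a key)).sum)).sum

-- ===== PRECONDITION & SPEC =====
-- Pre_ excludes the inputs on which Python A (and B) raises KeyError: an entry lacking the
-- "number" key, or — when p > 0, the only case in which the num_ids key is read at all — an entry
-- lacking the selected num_ids key; this is slightly stronger than A's exact access pattern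
-- (entries past the first p of a run are never read), and on that slack A and B agree anyway.
def Pre_count_total_ids (the_dict : List (List (String × Int))) (p : Int) (t : Int) : Prop :=
  ((the_dict.all (fun a => (a.find? (fun kv => kv.1 == "number")).isSome)) &&
   (decide (p ≤ 0) || the_dict.all (fun a =>
    (a.find? (fun kv => kv.1 ==
      (if t < 0 then "num_ids" else "num_ids_" ++ PySem.Int.toStr t))).isSome))) = true
instance (the_dict : List (List (String × Int))) (p : Int) (t : Int) : Decidable (Pre_count_total_ids the_dict p t) := by unfold Pre_count_total_ids; infer_instance

def pvWitness_count_total_ids : (List (List (String × Int))) × Int × Int :=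
  ([[("number", 1), ("num_ids", 2)], [("number", 1), ("num_ids", 5)], [("number", 2), ("num_ids", 7)]], 1, -1)

def Spec_count_total_ids (the_dict : List (List (String × Int))) (p : Int) (t : Int) (out : Int) : Prop := out = count_total_ids_alt the_dict p t
instance (the_dict : List (List (String × Int))) (p : Int) (t : Int) (out : Int) : Decidable (Spec_count_total_ids the_dict p t out) := by unfold Spec_count_total_ids; infer_instance

-- ===== CLAIM (what is proved, stated in full; the proofs are below) =====
def Claim_equal_count_total_ids : Prop := ∀ (the_dict : List (List (String × Int))) (p : Int) (t : Int), Dom_count_total_ids the_dict p t → Pre_count_total_ids the_dict p t → Spec_count_total_ids the_dict p t (count_total_ids the_dict p t)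

-- ===== LEMMAS AND PROOFS =====

-- the key string A selects each iteration equals B's once-computed key
theorem cti_val_eq (t : Int) (a : List (String × Int)) :
    (if t < 0 then pyLookup a "num_ids" else pyLookup a ("num_ids_" ++ PySem.Int.toStr t))
      = pyLookup a (if t < 0 then "num_ids" else "num_ids_" ++ PySem.Int.toStr t) := by
  by_cases h : t < 0 <;> simp [h]

-- A's fold across one run of constant number n, entered with current_count = cnt:
-- it adds the values of the first (p - cnt)⁺ entries and keeps current_number = n.
theorem cti_run_foldl (p t n : Int) :
    ∀ (g : List (List (String × Int))) (total cnt : Int),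
      (∀ y ∈ g, ctiNum y = n) →
      ∃ cnt', g.foldl (ctiStepA p t) (total, n, cnt) =
        (total + ((g.take (p - cnt).toNat).map
            (fun a => pyLookup a (if t < 0 then "num_ids" else "num_ids_" ++ PySem.Int.toStr t))).sum,
         n, cnt') := by
  intro g
  induction g with
  | nil => intro total cnt _; exact ⟨cnt, by simp⟩
  | cons y g ih =>
    intro total cnt hall
    have hy : ctiNum y = n := hall y (by simp)
    have hg : ∀ z ∈ g, ctiNum z = n := fun z hz => hall z (by simp [hz])
    simp only [List.foldl_cons]
    by_cases hc : cnt < p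
    · have hstep : ctiStepA p t (total, n, cnt) y =
          (total + pyLookup y (if t < 0 then "num_ids" else "num_ids_" ++ PySem.Int.toStr t), n, cnt + 1) := by
        simp [ctiStepA, ctiNum] at hy ⊢
        simp [hy, hc, cti_val_eq]
      rw [hstep]
      obtain ⟨cnt', hfold⟩ := ih (total + pyLookup y (if t < 0 then "num_ids" else "num_ids_" ++ PySem.Int.toStr t)) (cnt + 1) hg
      refine ⟨cnt', ?_⟩
      rw [hfold]
      have htake : (p - cnt).toNat = (p - (cnt + 1)).toNat + 1 := by omega
      rw [htake]
      simp [List.take_succ_cons]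
      ring
    · have hstep : ctiStepA p t (total, n, cnt) y = (total, n, cnt) := by
        simp [ctiStepA, ctiNum] at hy ⊢
        simp [hy, hc]
      rw [hstep]
      obtain ⟨cnt', hfold⟩ := ih total cnt hg
      refine ⟨cnt', ?_⟩
      rw [hfold]
      have h0 : (p - cnt).toNat = 0 := by omega
      simp [h0]

-- the first iteration on the head of a run behaves as if entered with state (total, number, 0)
theorem cti_step_head (p t total cur cnt : Int) (x : List (String × Int))
    (h : ctiNum x ≠ cur ∨ (cnt = 0 ∧ cur = ctiNum x)) :
    ctiStepA p t (total, cur, cnt) x = ctiStepA p t (total, ctiNum x, 0) x := by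
  rcases h with h | ⟨h0, hc⟩
  · simp [ctiStepA, ctiNum] at h ⊢
    simp [h]
  · subst h0 hc
    rfl

-- main invariant: from a state that is either fresh (cnt = 0) or at a run boundary
-- (head's number differs from current_number), A's fold yields total + B's grouped sum
theorem cti_main (p t : Int) :
    ∀ (l : List (List (String × Int))) (total cur cnt : Int),
      (cnt = 0 ∨ ∀ x xs, l = x :: xs → ctiNum x ≠ cur) →
      (l.foldl (ctiStepA p t) (total, cur, cnt)).1 =
        total + ((ctiRuns l).map
          (fun g => ((g.take p.toNat).map
            (fun a => pyLookup a (if t < 0 then "num_ids" else "num_ids_" ++ PySem.Int.toStr t))).sum)).sum := by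
  intro l
  induction l using ctiRuns.induct with
  | case1 => intro total cur cnt _; simp [ctiRuns]
  | case2 x xs ih =>
    intro total cur cnt hok
    have hhead : ctiNum x ≠ cur ∨ (cnt = 0 ∧ cur = ctiNum x) := by
      rcases hok with h0 | hne
      · by_cases hx : ctiNum x = cur
        · exact Or.inr ⟨h0, hx.symm⟩
        · exact Or.inl hx
      · exact Or.inl (hne x xs rfl)
    have hsplit : xs = xs.takeWhile (fun y => ctiNum y == ctiNum x)
        ++ xs.dropWhile (fun y => ctiNum y == ctiNum x) :=
      (List.takeWhile_append_dropWhile).symm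
    rw [List.foldl_cons, cti_step_head p t total cur cnt x hhead]
    conv_lhs => rw [hsplit]
    rw [List.foldl_append]
    -- the run x :: takeWhile …
    have hrun : ∀ y ∈ x :: xs.takeWhile (fun y => ctiNum y == ctiNum x), ctiNum y = ctiNum x := by
      intro y hy
      rcases List.mem_cons.1 hy with h | h
      · rw [h]
      · have hb := List.mem_takeWhile_imp h
        exact eq_of_beq (by simpa using hb)
    obtain ⟨cnt', hfold⟩ := cti_run_foldl p t (ctiNum x)
      (x :: xs.takeWhile (fun y => ctiNum y == ctiNum x)) total 0 hrun
    rw [List.foldl_cons] at hfold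
    rw [hfold]
    -- the tail after the run starts with a different number (or is empty)
    have hrest : cnt' = 0 ∨ ∀ z zs,
        xs.dropWhile (fun y => ctiNum y == ctiNum x) = z :: zs → ctiNum z ≠ ctiNum x := by
      right
      intro z zs hz
      have hb : (fun y => ctiNum y == ctiNum x) z = false := by
        have := List.head_dropWhile_not (l := xs) (fun y => ctiNum y == ctiNum x) (by simp [hz])
        simpa [hz] using this
      simpa using hb
    rw [ih _ (ctiNum x) cnt' hrest]
    have hps : p - 0 = p := by ring
    simp only [ctiRuns, List.map_cons, List.sum_cons, hps]
    ring

-- ===== VERDICT (by name: the statement is the Claim_ definition above) =====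
theorem count_total_ids_spec : Claim_equal_count_total_ids := by
  intro the_dict p t _ _
  unfold Spec_count_total_ids count_total_ids count_total_ids_alt
  rw [cti_main p t the_dict 0 (-1) 0 (Or.inl rfl)]
  simp
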